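-- pv_equiv track=rewrite | github.com/napetrov/abicheck | abicheck/sycl_metadata.py | _detect_ur_version_from_symbols
-- ===== SOURCE A (Python) =====
-- def _detect_ur_version_from_symbols(symbols: list[str]) -> str:
--     """Heuristic UR version detection from exported symbol set.
--
--     UR versions are detected by presence of landmark entry points
--     added in each release.
--
--     Returns empty string if version cannot be determined.
--     """
--     # UR 0.10+ added urKernelSetArgSampler, urBindlessImages*
--     has_bindless = any(s.startswith("urBindlessImages") for s in symbols)
--     # UR 0.9+ added urVirtualMem*, urPhysicalMem*
--     has_virtual_mem = any(s.startswith("urVirtualMem") for s in symbols)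
--     # UR 0.8+ added urCommandBuffer*
--     has_cmd_buffer = any(s.startswith("urCommandBuffer") for s in symbols)
--
--     if has_bindless:
--         return "0.10"
--     if has_virtual_mem:
--         return "0.9"
--     if has_cmd_buffer:
--         return "0.8"
--     if "urAdapterGet" in symbols:
--         return "0.7"
--     return ""
-- ===== SOURCE B (Python) =====
-- _UR_VERSIONS = ("", "0.7", "0.8", "0.9", "0.10")
--
--
-- def _landmark_rank(s: str) -> int:
--     """Classify a single symbol by the newest UR landmark it witnesses."""
--     if s.startswith("urBindlessImages"):
--         return 4
--     if s.startswith("urVirtualMem"):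
--         return 3
--     if s.startswith("urCommandBuffer"):
--         return 2
--     if s == "urAdapterGet":
--         return 1
--     return 0
--
--
-- def _detect_ur_version_from_symbols(symbols: list[str]) -> str:
--     """Rank each symbol, take the maximum rank, and look it up in a version table."""
--     return _UR_VERSIONS[max(map(_landmark_rank, symbols), default=0)]
-- ===== Notes on version B (the rewrite author's own statement) =====
-- stated objective: alternative
-- what changed: B replaces A's four boolean scans and priority if-chain by a per-symbol numeric landmark ranking, a single maximum over the ranks, and a table lookup of the version string.
import Mathlib
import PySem

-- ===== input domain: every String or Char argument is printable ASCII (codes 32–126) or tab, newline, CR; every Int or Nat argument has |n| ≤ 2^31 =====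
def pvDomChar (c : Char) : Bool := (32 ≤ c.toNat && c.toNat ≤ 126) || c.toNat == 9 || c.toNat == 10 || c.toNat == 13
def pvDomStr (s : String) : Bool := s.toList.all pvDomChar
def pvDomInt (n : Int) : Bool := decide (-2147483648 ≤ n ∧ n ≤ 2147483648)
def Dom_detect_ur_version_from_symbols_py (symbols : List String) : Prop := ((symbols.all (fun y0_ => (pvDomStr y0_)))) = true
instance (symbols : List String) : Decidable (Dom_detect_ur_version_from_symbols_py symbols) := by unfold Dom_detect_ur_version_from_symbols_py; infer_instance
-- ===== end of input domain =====

-- B replaces A's four boolean scans + priority if-chain by a per-symbol numeric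
-- landmark rank, one maximum over the ranks, and a version-table lookup.

-- ===== PORT A =====
def detect_ur_version_from_symbols_py (symbols : List String) : String :=
  let has_bindless := symbols.any (fun s => PySem.Str.startswith s "urBindlessImages")
  let has_virtual_mem := symbols.any (fun s => PySem.Str.startswith s "urVirtualMem")
  let has_cmd_buffer := symbols.any (fun s => PySem.Str.startswith s "urCommandBuffer")
  if has_bindless then "0.10"
  else if has_virtual_mem then "0.9"
  else if has_cmd_buffer then "0.8"
  else if symbols.contains "urAdapterGet" then "0.7"
  else ""

-- ===== PORT B =====
def pvUrVersions : List String := ["", "0.7", "0.8", "0.9", "0.10"]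

def pvLandmarkRank (s : String) : Nat :=
  if PySem.Str.startswith s "urBindlessImages" then 4
  else if PySem.Str.startswith s "urVirtualMem" then 3
  else if PySem.Str.startswith s "urCommandBuffer" then 2
  else if s == "urAdapterGet" then 1
  else 0

-- max(map(rank, symbols), default=0) → fold of Nat.max from 0; the table index is
-- always 0..4 so the Python indexing never raises and getD is exact here.
def detect_ur_version_from_symbols_py_alt (symbols : List String) : String :=
  pvUrVersions.getD ((symbols.map pvLandmarkRank).foldl Nat.max 0) ""

-- ===== PRECONDITION & SPEC =====
def Spec_detect_ur_version_from_symbols_py (symbols : List String) (out : String) : Prop := out = detect_ur_version_from_symbols_py_alt symbols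
instance (symbols : List String) (out : String) : Decidable (Spec_detect_ur_version_from_symbols_py symbols out) := by unfold Spec_detect_ur_version_from_symbols_py; infer_instance

-- ===== CLAIM (what is proved, stated in full; the proofs are below) =====
def Claim_equal_detect_ur_version_from_symbols_py : Prop := ∀ (symbols : List String), Dom_detect_ur_version_from_symbols_py symbols → Spec_detect_ur_version_from_symbols_py symbols (detect_ur_version_from_symbols_py symbols)

-- ===== LEMMAS AND PROOFS =====

-- pull the accumulator out of the max-fold
theorem foldl_max_acc (l : List Nat) (a : Nat) :
    l.foldl Nat.max a = Nat.max a (l.foldl Nat.max 0) := by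
  induction l generalizing a with
  | nil => simp
  | cons x xs ih =>
    simp only [List.foldl_cons]
    rw [ih (Nat.max a x), ih (Nat.max 0 x)]
    simp only [Nat.max_def]
    split_ifs <;> omega

-- the maximum rank equals A's priority case analysis
theorem max_rank_eq (symbols : List String) :
    (symbols.map pvLandmarkRank).foldl Nat.max 0 =
      if symbols.any (fun s => PySem.Str.startswith s "urBindlessImages") then 4
      else if symbols.any (fun s => PySem.Str.startswith s "urVirtualMem") then 3
      else if symbols.any (fun s => PySem.Str.startswith s "urCommandBuffer") then 2
      else if symbols.contains "urAdapterGet" then 1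
      else 0 := by
  induction symbols with
  | nil => simp
  | cons x xs ih =>
    simp only [List.map_cons, List.foldl_cons, List.any_cons, List.contains_cons]
    rw [foldl_max_acc, ih]
    unfold pvLandmarkRank
    have hx : (BEq.beq "urAdapterGet" x) = (x == "urAdapterGet") := by
      rw [BEq.comm]
    rw [hx]
    generalize (PySem.Str.startswith x "urBindlessImages") = b
    generalize (PySem.Str.startswith x "urVirtualMem") = v
    generalize (PySem.Str.startswith x "urCommandBuffer") = c
    generalize (x == "urAdapterGet") = e
    generalize (xs.any fun s => PySem.Str.startswith s "urBindlessImages") = fb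
    generalize (xs.any fun s => PySem.Str.startswith s "urVirtualMem") = fv
    generalize (xs.any fun s => PySem.Str.startswith s "urCommandBuffer") = fc
    generalize (xs.contains "urAdapterGet") = fe
    cases b <;> cases v <;> cases c <;> cases e <;> cases fb <;> cases fv <;> cases fc <;> cases fe <;> decide

-- ===== VERDICT (by name: the statement is the Claim_ definition above) =====
theorem detect_ur_version_from_symbols_py_spec : Claim_equal_detect_ur_version_from_symbols_py := by
  intro symbols _
  unfold Spec_detect_ur_version_from_symbols_py detect_ur_version_from_symbols_py detect_ur_version_from_symbols_py_alt
  rw [max_rank_eq]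
  generalize (symbols.any fun s => PySem.Str.startswith s "urBindlessImages") = fb
  generalize (symbols.any fun s => PySem.Str.startswith s "urVirtualMem") = fv
  generalize (symbols.any fun s => PySem.Str.startswith s "urCommandBuffer") = fc
  generalize (symbols.contains "urAdapterGet") = fe
  cases fb <;> cases fv <;> cases fc <;> cases fe <;> rfl
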